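-- pv_equiv track=rewrite | github.com/gogolevau/Placer | extremepoints.py | extreme_points
-- ===== SOURCE A (Python) =====
-- def extreme_points(approx):
--     top = approx[0][0]
--     bottom = approx[0][0]
--     left = approx[0][0]
--     right = approx[0][0]
--
--     for i in range(1, len(approx)):
--         if top[1] > approx[i][0][1]:
--             top = approx[i][0]
--         if bottom[1] < approx[i][0][1]:
--             bottom = approx[i][0]
--         if left[0] > approx[i][0][0]:
--             left = approx[i][0]
--         if right[0] < approx[i][0][0]:
--             right = approx[i][0]
--
--     return top, bottom, left, right
-- ===== SOURCE B (Python) =====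
-- def extreme_points(approx):
--     top = min(approx, key=lambda p: p[0][1])[0]
--     bottom = max(approx, key=lambda p: p[0][1])[0]
--     left = min(approx, key=lambda p: p[0][0])[0]
--     right = max(approx, key=lambda p: p[0][0])[0]
--     return top, bottom, left, right
-- ===== Notes on version B (the rewrite author's own statement) =====
-- stated objective: idiomatic
-- what changed: One interleaved index loop maintaining four candidates with branch-updates is replaced by four independent reductions using Python's built-in min/max with a coordinate key (first-occurrence tie-breaking matches A). Pre_ excludes inputs with a first point of fewer than two coordinates, on which A may still return (the missing coordinate is never read when the loop does not run) but B's min/max key raises.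
-- outside the precondition, e.g. on extreme_points([[[42], [1]]]): A returns ([42], [42], [42], [42]), B raises IndexError
import Mathlib
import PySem

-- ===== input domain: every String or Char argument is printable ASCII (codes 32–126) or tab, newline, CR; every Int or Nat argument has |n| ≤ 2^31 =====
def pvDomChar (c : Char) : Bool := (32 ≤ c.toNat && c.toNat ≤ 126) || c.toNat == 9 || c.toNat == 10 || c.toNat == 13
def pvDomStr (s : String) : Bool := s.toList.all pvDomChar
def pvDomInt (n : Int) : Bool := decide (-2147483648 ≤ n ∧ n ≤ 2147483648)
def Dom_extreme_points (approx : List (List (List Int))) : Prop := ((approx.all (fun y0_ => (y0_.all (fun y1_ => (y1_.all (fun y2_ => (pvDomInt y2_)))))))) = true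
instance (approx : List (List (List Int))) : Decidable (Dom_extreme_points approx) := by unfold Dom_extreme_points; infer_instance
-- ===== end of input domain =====

-- B replaces A's single interleaved index loop by four independent min/max reductions
-- with a coordinate key (idiomatic); same return values on Pre_.

-- ===== PORT A =====
-- approx[i][0] (first point of the i-th element); defaults only fire outside Pre_
def pvPt (approx : List (List (List Int))) (i : Int) : List Int :=
  PySem.List.pyGetD (PySem.List.pyGetD approx i []) 0 []

-- p[j] of a point; default only fires outside Pre_
def pvCoord (p : List Int) (j : Int) : Int := PySem.List.pyGetD p j 0

def extreme_points (approx : List (List (List Int))) : List Int × List Int × List Int × List Int :=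
  let p0 := pvPt approx 0
  (PySem.List.pyRange 1 (approx.length : Int) 1).foldl
    (fun (st : List Int × List Int × List Int × List Int) (i : Int) =>
      let pi := pvPt approx i
      let t := if pvCoord st.1 1 > pvCoord pi 1 then pi else st.1
      let b := if pvCoord st.2.1 1 < pvCoord pi 1 then pi else st.2.1
      let l := if pvCoord st.2.2.1 0 > pvCoord pi 0 then pi else st.2.2.1
      let r := if pvCoord st.2.2.2 0 < pvCoord pi 0 then pi else st.2.2.2
      (t, b, l, r))
    (p0, p0, p0, p0)

-- ===== PORT B =====
-- key p = p[0][j]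
def pvKey (j : Int) (p : List (List Int)) : Int := pvCoord (PySem.List.pyGetD p 0 []) j

def extreme_points_alt (approx : List (List (List Int))) : List Int × List Int × List Int × List Int :=
  let top    := PySem.List.pyGetD ((PySem.List.min? approx (pvKey 1)).getD []) 0 []
  let bottom := PySem.List.pyGetD ((PySem.List.max? approx (pvKey 1)).getD []) 0 []
  let left   := PySem.List.pyGetD ((PySem.List.min? approx (pvKey 0)).getD []) 0 []
  let right  := PySem.List.pyGetD ((PySem.List.max? approx (pvKey 0)).getD []) 0 []
  (top, bottom, left, right)

-- ===== PRECONDITION & SPEC =====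
-- Pre_ excludes inputs where some first point has fewer than two coordinates: A may still return there
-- (the missing coordinate is never read when the loop does not run) but B's min/max key raises; see cites.
def Pre_extreme_points (approx : List (List (List Int))) : Prop :=
  approx ≠ [] ∧ ∀ p ∈ approx, p ≠ [] ∧ 2 ≤ (p.headD []).length
instance (approx : List (List (List Int))) : Decidable (Pre_extreme_points approx) := by unfold Pre_extreme_points; infer_instance

def pvWitness_extreme_points : List (List (List Int)) := [[[0, 3]], [[2, 1], [9, 9]], [[-1, 2]]]

def Spec_extreme_points (approx : List (List (List Int))) (out : List Int × List Int × List Int × List Int) : Prop := out = extreme_points_alt approx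
instance (approx : List (List (List Int))) (out : List Int × List Int × List Int × List Int) : Decidable (Spec_extreme_points approx out) := by unfold Spec_extreme_points; infer_instance

-- ===== CLAIM (what is proved, stated in full; the proofs are below) =====
def Claim_equal_extreme_points : Prop := ∀ (approx : List (List (List Int))), Dom_extreme_points approx → Pre_extreme_points approx → Spec_extreme_points approx (extreme_points approx)

-- ===== LEMMAS AND PROOFS =====

-- min?/max? on a cons is the running fold keeping the first extremal element
lemma min?_cons_foldl {α κ : Type} [LinearOrder κ] (x : α) (t : List α) (key : α → κ) :
    PySem.List.min? (x :: t) key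
      = some (t.foldl (fun m y => if key y < key m then y else m) x) := by
  simp only [PySem.List.min?, List.foldl_cons]
  induction t generalizing x with
  | nil => rfl
  | cons y t ih => simp only [List.foldl_cons]; split <;> exact ih _

lemma max?_cons_foldl {α κ : Type} [LinearOrder κ] (x : α) (t : List α) (key : α → κ) :
    PySem.List.max? (x :: t) key
      = some (t.foldl (fun m y => if key m < key y then y else m) x) := by
  simp only [PySem.List.max?, List.foldl_cons]
  induction t generalizing x with
  | nil => rfl
  | cons y t ih => simp only [List.foldl_cons]; split <;> exact ih _

-- A's branch-update over stored first points equals the fold over whole elements, projected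
lemma minA_foldl (t : List (List (List Int))) (m : List (List Int)) (j : Int) :
    t.foldl (fun acc p => if pvCoord acc j > pvKey j p then PySem.List.pyGetD p 0 [] else acc)
        (PySem.List.pyGetD m 0 [])
      = PySem.List.pyGetD (t.foldl (fun m y => if pvKey j y < pvKey j m then y else m) m) 0 [] := by
  induction t generalizing m with
  | nil => rfl
  | cons p t ih =>
      simp only [List.foldl_cons]
      by_cases h : pvKey j p < pvKey j m
      · rw [if_pos (by simpa [pvKey] using h), if_pos h, ih]
      · rw [if_neg (by simpa [pvKey] using h), if_neg h, ih]

lemma maxA_foldl (t : List (List (List Int))) (m : List (List Int)) (j : Int) :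
    t.foldl (fun acc p => if pvCoord acc j < pvKey j p then PySem.List.pyGetD p 0 [] else acc)
        (PySem.List.pyGetD m 0 [])
      = PySem.List.pyGetD (t.foldl (fun m y => if pvKey j m < pvKey j y then y else m) m) 0 [] := by
  induction t generalizing m with
  | nil => rfl
  | cons p t ih =>
      simp only [List.foldl_cons]
      by_cases h : pvKey j m < pvKey j p
      · rw [if_pos (by simpa [pvKey] using h), if_pos h, ih]
      · rw [if_neg (by simpa [pvKey] using h), if_neg h, ih]

-- the combined 4-tuple fold splits into four independent folds
lemma foldl_split4 (t : List (List (List Int)))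
    (f1 g1 f0 g0 : List Int → List (List Int) → List Int)
    (a b c d : List Int) :
    t.foldl (fun (st : List Int × List Int × List Int × List Int) p =>
        (f1 st.1 p, g1 st.2.1 p, f0 st.2.2.1 p, g0 st.2.2.2 p)) (a, b, c, d)
      = (t.foldl f1 a, t.foldl g1 b, t.foldl f0 c, t.foldl g0 d) := by
  induction t generalizing a b c d with
  | nil => rfl
  | cons p t ih => simp only [List.foldl_cons]; exact ih _ _ _ _

-- ===== VERDICT (by name: the statement is the Claim_ definition above) =====
theorem extreme_points_spec : Claim_equal_extreme_points := by
  intro approx _ hpre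
  obtain ⟨hne, _⟩ := hpre
  obtain ⟨p, t, rfl⟩ : ∃ p t, approx = p :: t := by
    cases approx with
    | nil => exact absurd rfl hne
    | cons p t => exact ⟨p, t, rfl⟩
  unfold Spec_extreme_points extreme_points extreme_points_alt
  simp only [pvPt]
  rw [PySem.List.foldl_pyRange_pyGetD' ((p :: t)) ([] : List (List Int))
      (fun (st : List Int × List Int × List Int × List Int) (x : List (List Int)) =>
        let pi := PySem.List.pyGetD x 0 []
        ( if pvCoord st.1 1 > pvCoord pi 1 then pi else st.1,
          if pvCoord st.2.1 1 < pvCoord pi 1 then pi else st.2.1,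
          if pvCoord st.2.2.1 0 > pvCoord pi 0 then pi else st.2.2.1,
          if pvCoord st.2.2.2 0 < pvCoord pi 0 then pi else st.2.2.2 )) _ (by norm_num)]
  simp only [min?_cons_foldl, max?_cons_foldl, Option.getD_some]
  have hdrop : (p :: t).drop (1 : Int).toNat = t := rfl
  rw [hdrop]
  have hp0 : PySem.List.pyGetD (p :: t) 0 [] = p := by
    simp [PySem.List.pyGetD, PySem.List.pyGet?, PySem.List.pyIdx?]
  rw [hp0,
    foldl_split4 t
      (fun a x => if pvCoord a 1 > pvCoord (PySem.List.pyGetD x 0 []) 1 then PySem.List.pyGetD x 0 [] else a)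
      (fun a x => if pvCoord a 1 < pvCoord (PySem.List.pyGetD x 0 []) 1 then PySem.List.pyGetD x 0 [] else a)
      (fun a x => if pvCoord a 0 > pvCoord (PySem.List.pyGetD x 0 []) 0 then PySem.List.pyGetD x 0 [] else a)
      (fun a x => if pvCoord a 0 < pvCoord (PySem.List.pyGetD x 0 []) 0 then PySem.List.pyGetD x 0 [] else a)]
  refine Prod.ext ?_ (Prod.ext ?_ (Prod.ext ?_ ?_)) <;>
    simp only [gt_iff_lt]
  · simpa [pvKey] using minA_foldl t p 1
  · simpa [pvKey] using maxA_foldl t p 1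
  · simpa [pvKey] using minA_foldl t p 0
  · simpa [pvKey] using maxA_foldl t p 0
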